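-- pv_equiv track=rewrite | github.com/Evilnames/Collector | tapestry.py | _make_zigzag_grid
-- ===== SOURCE A (Python) =====
-- TAPESTRY_COLS_PER_BLOCK = 16
--
-- TAPESTRY_ROWS_PER_BLOCK = 8
--
-- def _empty(h, w=1):
--     cols = w * TAPESTRY_COLS_PER_BLOCK
--     return [[False] * cols for _ in range(h * TAPESTRY_ROWS_PER_BLOCK)]
--
-- def _make_zigzag_grid(height, width=1):
--     cols = width * TAPESTRY_COLS_PER_BLOCK
--     rows = height * TAPESTRY_ROWS_PER_BLOCK
--     g = _empty(height, width)
--     period = 8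
--     for r in range(rows):
--         phase = r % (period * 2)
--         if phase < period:
--             c = phase
--         else:
--             c = period * 2 - 1 - phase
--         # Repeat the zigzag across the width
--         for x_offset in range(0, cols, period * 2):
--             for dc in range(3):
--                 col_pos = x_offset + c + dc
--                 if 0 <= col_pos < cols:
--                     g[r][col_pos] = True
--     return g
-- ===== SOURCE B (Python) =====
-- TAPESTRY_COLS_PER_BLOCK = 16
--
-- TAPESTRY_ROWS_PER_BLOCK = 8
--
--
-- def _make_zigzag_grid(height, width=1):
--     rows = height * TAPESTRY_ROWS_PER_BLOCK
--     out = []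
--     for r in range(rows):
--         phase = r % 16
--         c = phase if phase < 8 else 15 - phase
--         block = [c <= j <= c + 2 for j in range(TAPESTRY_COLS_PER_BLOCK)]
--         out.append(block * width)
--     return out
-- ===== Notes on version B (the rewrite author's own statement) =====
-- stated objective: alternative
-- what changed: B drops A's pre-allocated all-False grid and nested offset/dc scatter-write loops with a bounds guard: each row is built directly as the closed-form 16-cell block pattern [c <= j <= c+2 for j in range(16)] tiled width times by list repetition.
import Mathlib
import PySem

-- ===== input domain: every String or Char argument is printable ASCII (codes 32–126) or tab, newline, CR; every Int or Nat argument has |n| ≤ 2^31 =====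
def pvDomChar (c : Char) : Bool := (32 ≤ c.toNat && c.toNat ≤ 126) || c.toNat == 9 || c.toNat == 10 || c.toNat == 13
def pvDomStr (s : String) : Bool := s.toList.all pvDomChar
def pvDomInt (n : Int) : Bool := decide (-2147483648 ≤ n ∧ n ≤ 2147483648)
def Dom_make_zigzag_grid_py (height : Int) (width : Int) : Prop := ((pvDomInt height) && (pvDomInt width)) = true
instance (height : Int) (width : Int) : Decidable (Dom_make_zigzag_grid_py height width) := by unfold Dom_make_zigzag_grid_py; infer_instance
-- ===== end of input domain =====

-- B builds each row with a closed-form per-cell predicate c <= i % 16 <= c + 2 instead of A's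
-- pre-allocated all-False grid plus scatter-writes of 3 True cells per block (objective: simpler).


-- ===== PORT A =====
-- _empty: [[False] * cols for _ in range(h * 8)]; Python's list repetition with a
-- negative count gives [], which Int.toNat's clamping reproduces exactly.
def empty_py (h : Int) (w : Int) : List (List Bool) :=
  let cols := w * 16
  (PySem.List.pyRange 0 (h * 8) 1).map (fun _ => List.replicate cols.toNat false)

def make_zigzag_grid_py (height : Int) (width : Int) : List (List Bool) :=
  let cols := width * 16
  let rows := height * 8
  let g := empty_py height width
  let period : Int := 8
  (PySem.List.pyRange 0 rows 1).foldl (fun g r =>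
    let phase := PySem.Int.mod r (period * 2)
    let c := if phase < period then phase else period * 2 - 1 - phase
    (PySem.List.pyRange 0 cols (period * 2)).foldl (fun g x_offset =>
      (PySem.List.pyRange 0 3 1).foldl (fun g dc =>
        let col_pos := x_offset + c + dc
        if 0 ≤ col_pos ∧ col_pos < cols then
          -- g[r][col_pos] = True; r and col_pos are always in range here, so .toNat is exact
          g.modify r.toNat (fun row => row.set col_pos.toNat true)
        else g) g) g) g

-- ===== PORT B =====
-- 'block * width': Python list repetition; a non-positive count gives [], which
-- Int.toNat's clamping reproduces exactly.
def make_zigzag_grid_py_alt (height : Int) (width : Int) : List (List Bool) :=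
  let rows := height * 8
  (PySem.List.pyRange 0 rows 1).foldl (fun out r =>
    let phase := PySem.Int.mod r 16
    let c := if phase < 8 then phase else 15 - phase
    let block := (PySem.List.pyRange 0 16 1).map (fun j => decide (c ≤ j ∧ j ≤ c + 2))
    out ++ [(List.replicate width.toNat block).flatten]) []

-- ===== PRECONDITION & SPEC =====
def Spec_make_zigzag_grid_py (height : Int) (width : Int) (out : List (List Bool)) : Prop := out = make_zigzag_grid_py_alt height width
instance (height : Int) (width : Int) (out : List (List Bool)) : Decidable (Spec_make_zigzag_grid_py height width out) := by unfold Spec_make_zigzag_grid_py; infer_instance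

-- ===== CLAIM (what is proved, stated in full; the proofs are below) =====
def Claim_equal_make_zigzag_grid_py : Prop := ∀ (height : Int) (width : Int), Dom_make_zigzag_grid_py height width → Spec_make_zigzag_grid_py height width (make_zigzag_grid_py height width)

-- ===== LEMMAS AND PROOFS =====

-- Generic: a fold whose step preserves length and or's q u i onto cell i.
theorem foldl_or_char {α : Type} (step : List Bool → α → List Bool) (q : α → Nat → Bool)
    (hlen : ∀ row u, (step row u).length = row.length)
    (hget : ∀ (row : List Bool) (u : α) (i : Nat) (h : i < row.length),
      (step row u)[i]'(by rw [hlen]; exact h) = (row[i] || q u i)) :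
    ∀ (us : List α) (row : List Bool),
      (us.foldl step row).length = row.length ∧
      ∀ (i : Nat) (h : i < row.length) (h' : i < (us.foldl step row).length),
        (us.foldl step row)[i] = (row[i] || us.any (fun u => q u i)) := by
  intro us
  induction us with
  | nil => intro row; simp
  | cons u us ih =>
    intro row
    constructor
    · simpa [List.foldl_cons, hlen] using (ih (step row u)).1
    · intro i h h'
      have hi : i < (step row u).length := by rw [hlen]; exact h
      have := (ih (step row u)).2 i hi (by simpa [List.foldl_cons] using h')
      simp only [List.foldl_cons] at h' ⊢
      rw [this, hget row u i h]
      simp [Bool.or_assoc]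

-- Composition of modifications at the same index.
theorem modify_modify {β : Type} (g : List β) (k : Nat) (f f' : β → β) :
    (g.modify k f).modify k f' = g.modify k (fun b => f' (f b)) := by
  apply List.ext_getElem
  · simp
  · intro i h1 h2
    simp [List.getElem_modify]
    split_ifs <;> rfl

-- A fold that modifies the same index k each step equals one modification by the folded row update.
theorem foldl_modify {α β : Type} (us : List α) (k : Nat) (f : α → β → β) (g : List β) :
    us.foldl (fun g u => g.modify k (f u)) g
      = g.modify k (fun row => us.foldl (fun row u => f u row) row) := by
  induction us generalizing g with
  | nil => exact (List.modify_id k g).symm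
  | cons u us ih =>
    simp only [List.foldl_cons]
    rw [ih, modify_modify]

-- Same with a per-step guard on the update.
theorem foldl_modify_if {α β : Type} (us : List α) (k : Nat) (f : α → β → β)
    (p : α → Prop) [DecidablePred p] (g : List β) :
    us.foldl (fun g u => if p u then g.modify k (f u) else g) g
      = g.modify k (fun row => us.foldl (fun row u => if p u then f u row else row) row) := by
  have hfun : (fun (g : List β) (u : α) => if p u then g.modify k (f u) else g)
      = fun g u => g.modify k (fun row => if p u then f u row else row) := by
    funext g u
    split_ifs with hp
    · rfl
    · exact (List.modify_id k g).symm
  rw [hfun]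
  exact foldl_modify us k (fun u row => if p u then f u row else row) g

-- Folding modifications over range 0..n-1, evaluated at cell i.
theorem foldl_range_modify {β : Type} (F : Int → β → β) :
    ∀ (n : Nat) (g : List β),
      ((PySem.List.pyRange 0 (n : Int) 1).foldl (fun g r => g.modify r.toNat (F r)) g).length
          = g.length ∧
      ∀ (i : Nat) (h : i < g.length)
        (h' : i < ((PySem.List.pyRange 0 (n : Int) 1).foldl (fun g r => g.modify r.toNat (F r)) g).length),
        ((PySem.List.pyRange 0 (n : Int) 1).foldl (fun g r => g.modify r.toNat (F r)) g)[i]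
          = if i < n then F (i : Int) g[i] else g[i] := by
  intro n
  induction n with
  | zero => intro g; simp [PySem.List.pyRange_one_eq_nil]
  | succ n ih =>
    intro g
    have hsplit : PySem.List.pyRange 0 ((n + 1 : Nat) : Int) 1
        = PySem.List.pyRange 0 (n : Int) 1 ++ [(n : Int)] := by
      have := PySem.List.pyRange_one_succ_right (a := 0) (b := (n : Int)) (by positivity)
      simpa [Nat.cast_add, Nat.cast_one] using this
    constructor
    · rw [hsplit, List.foldl_append]
      simp [List.length_modify, (ih g).1]
    · intro i h h'
      simp only [hsplit, List.foldl_append, List.foldl_cons, List.foldl_nil] at h' ⊢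
      rw [List.getElem_modify]
      have hlen := (ih g).1
      have hget := (ih g).2 i h (by rw [hlen]; exact h)
      have hn : ((n : Int)).toNat = n := by simp
      simp only [hn]
      rw [hget]
      by_cases hin : i = n
      · subst hin
        simp
      · have hne : (n = i) = False := by simp [Ne.symm hin]
        simp only [hne, if_false]
        by_cases hlt : i < n
        · simp [hlt, Nat.lt_succ_of_lt hlt]
        · have h1 : ¬ i < n + 1 := by omega
          simp [hlt, h1]

-- The inner pair of loops of A acting on a single row, at cell i: it or's in
-- "some offset/dc pair writes cell i" (every write stores true).
theorem row_loops_char (c cols : Int) :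
    ∀ (row : List Bool),
      ((PySem.List.pyRange 0 cols 16).foldl (fun row x_offset =>
          (PySem.List.pyRange 0 3 1).foldl (fun row dc =>
            if 0 ≤ x_offset + c + dc ∧ x_offset + c + dc < cols then
              row.set (x_offset + c + dc).toNat true else row) row) row).length = row.length ∧
      ∀ (i : Nat) (h : i < row.length)
        (h' : i < ((PySem.List.pyRange 0 cols 16).foldl (fun row x_offset =>
          (PySem.List.pyRange 0 3 1).foldl (fun row dc =>
            if 0 ≤ x_offset + c + dc ∧ x_offset + c + dc < cols then
              row.set (x_offset + c + dc).toNat true else row) row) row).length),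
        ((PySem.List.pyRange 0 cols 16).foldl (fun row x_offset =>
          (PySem.List.pyRange 0 3 1).foldl (fun row dc =>
            if 0 ≤ x_offset + c + dc ∧ x_offset + c + dc < cols then
              row.set (x_offset + c + dc).toNat true else row) row) row)[i]
          = (row[i] || (PySem.List.pyRange 0 cols 16).any (fun x_offset =>
              (PySem.List.pyRange 0 3 1).any (fun dc =>
                decide (0 ≤ x_offset + c + dc ∧ x_offset + c + dc < cols)
                  && ((x_offset + c + dc).toNat == i)))) := by
  have hlen1 : ∀ (x_offset : Int) (row : List Bool) (dc : Int),
      ((fun (row : List Bool) (dc : Int) =>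
        if 0 ≤ x_offset + c + dc ∧ x_offset + c + dc < cols then
          row.set (x_offset + c + dc).toNat true else row) row dc).length = row.length := by
    intro x row dc; dsimp only; split_ifs <;> simp
  have inner : ∀ (x_offset : Int) (row : List Bool),
      ((PySem.List.pyRange 0 3 1).foldl (fun row dc =>
          if 0 ≤ x_offset + c + dc ∧ x_offset + c + dc < cols then
            row.set (x_offset + c + dc).toNat true else row) row).length = row.length ∧
      ∀ (i : Nat) (h : i < row.length)
        (h' : i < ((PySem.List.pyRange 0 3 1).foldl (fun row dc =>
          if 0 ≤ x_offset + c + dc ∧ x_offset + c + dc < cols then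
            row.set (x_offset + c + dc).toNat true else row) row).length),
        ((PySem.List.pyRange 0 3 1).foldl (fun row dc =>
          if 0 ≤ x_offset + c + dc ∧ x_offset + c + dc < cols then
            row.set (x_offset + c + dc).toNat true else row) row)[i]
          = (row[i] || (PySem.List.pyRange 0 3 1).any (fun dc =>
              decide (0 ≤ x_offset + c + dc ∧ x_offset + c + dc < cols)
                && ((x_offset + c + dc).toNat == i))) := by
    intro x_offset
    apply foldl_or_char _ _ (hlen1 x_offset)
    intro row dc i h
    split_ifs with hp
    · rw [List.getElem_set]
      by_cases he : (x_offset + c + dc).toNat = i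
      · simp [he, hp]
      · simp [he, hp]
    · simp [hp]
  apply foldl_or_char _ _ (fun row x => (inner x row).1)
  intro row x i h
  exact (inner x row).2 i h (by rw [(inner x row).1]; exact h)

-- Arithmetic core: the scatter-write hit test equals the per-cell mod-16 predicate.
theorem hit_iff (w : Int) (c : Int) (hc0 : 0 ≤ c) (hc7 : c ≤ 7) (i : Nat)
    (hi : i < (w * 16).toNat) :
    ((PySem.List.pyRange 0 (w * 16) 16).any (fun x_offset =>
        (PySem.List.pyRange 0 3 1).any (fun dc =>
          decide (0 ≤ x_offset + c + dc ∧ x_offset + c + dc < w * 16)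
            && ((x_offset + c + dc).toNat == i))))
      = decide (c ≤ (i : Int) % 16 ∧ (i : Int) % 16 ≤ c + 2) := by
  have hiw : (i : Int) < w * 16 := by omega
  by_cases hgoal : c ≤ (i : Int) % 16 ∧ (i : Int) % 16 ≤ c + 2
  · rw [decide_eq_true hgoal, List.any_eq_true]
    refine ⟨16 * ((i : Int) / 16), ?_, ?_⟩
    · rw [PySem.List.mem_pyRange_iff_of_pos (by norm_num)]
      refine ⟨by omega, by omega, ⟨(i : Int) / 16, by ring⟩⟩
    · rw [List.any_eq_true]
      refine ⟨(i : Int) % 16 - c, ?_, ?_⟩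
      · rw [PySem.List.mem_pyRange_one]
        omega
      · have hx : 16 * ((i : Int) / 16) + c + ((i : Int) % 16 - c) = (i : Int) := by omega
        rw [hx]
        simp only [Bool.and_eq_true, decide_eq_true_eq, beq_iff_eq]
        exact ⟨⟨by omega, hiw⟩, by omega⟩
  · rw [decide_eq_false hgoal, Bool.eq_false_iff]
    intro hany
    rw [List.any_eq_true] at hany
    obtain ⟨x, hx, hdc⟩ := hany
    rw [PySem.List.mem_pyRange_iff_of_pos (by norm_num)] at hx
    obtain ⟨hx0, hxlt, k, hk⟩ := hx
    rw [List.any_eq_true] at hdc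
    obtain ⟨dc, hdcmem, hbody⟩ := hdc
    rw [PySem.List.mem_pyRange_one] at hdcmem
    simp only [Bool.and_eq_true, decide_eq_true_eq, beq_iff_eq] at hbody
    obtain ⟨⟨hge, hlt⟩, heq⟩ := hbody
    omega

-- One row of A (the pair of loops on an all-False row) equals one row of B.
theorem row_eq (w : Int) (c : Int) (hc0 : 0 ≤ c) (hc7 : c ≤ 7) :
    ((PySem.List.pyRange 0 (w * 16) 16).foldl (fun row x_offset =>
        (PySem.List.pyRange 0 3 1).foldl (fun row dc =>
          if 0 ≤ x_offset + c + dc ∧ x_offset + c + dc < w * 16 then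
            row.set (x_offset + c + dc).toNat true else row) row)
        (List.replicate (w * 16).toNat false))
      = (PySem.List.pyRange 0 (w * 16) 1).map
          (fun i => decide (c ≤ i % 16) && decide (i % 16 ≤ c + 2)) := by
  obtain ⟨hlen, hget⟩ := row_loops_char c (w * 16) (List.replicate (w * 16).toNat false)
  apply List.ext_getElem
  · rw [hlen]
    simp [PySem.List.length_pyRange_one]
  · intro i h1 h2
    have hi : i < (w * 16).toNat := by
      rw [hlen] at h1; simpa using h1
    rw [hget i (by simpa using hi) h1]
    rw [List.getElem_map, PySem.List.getElem_pyRange_one]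
    have hzero : (List.replicate (w * 16).toNat false)[i]'(by simpa using hi) = false :=
      List.getElem_replicate ..
    rw [hzero, Bool.false_or, hit_iff w c hc0 hc7 i hi]
    simp

-- Flattening a map to singleton blocks is a plain map.
theorem flatten_map_singleton {a b : Type} (f : a -> b) (l : List a) :
    (l.map (fun x => [f x])).flatten = l.map f := by
  induction l with
  | nil => rfl
  | cons x xs ih => simp [ih]

-- Tiling: the per-cell mod-16 predicate over a width*16 range is the 16-cell
-- block pattern repeated width times.
theorem tile_eq_nat (c : Int) : ∀ (n : Nat),
    (PySem.List.pyRange 0 ((n : Int) * 16) 1).map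
        (fun i => decide (c ≤ i % 16) && decide (i % 16 ≤ c + 2))
      = (List.replicate n
          ((PySem.List.pyRange 0 16 1).map
            (fun j => decide (c ≤ j) && decide (j ≤ c + 2)))).flatten := by
  intro n
  induction n with
  | zero => simp [PySem.List.pyRange_one_eq_nil]
  | succ n ih =>
    push_cast
    have hexp : ((n : Int) + 1) * 16 = (n : Int) * 16 + 16 := by ring
    have hsplit : PySem.List.pyRange 0 (((n : Int) + 1) * 16) 1
        = PySem.List.pyRange 0 ((n : Int) * 16) 1
          ++ PySem.List.pyRange ((n : Int) * 16) (((n : Int) + 1) * 16) 1 := by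
      apply PySem.List.pyRange_one_append
      · positivity
      · omega
    rw [hsplit, List.map_append, ih, List.replicate_succ', List.flatten_append]
    congr 1
    rw [PySem.List.pyRange_one ((n : Int) * 16), PySem.List.pyRange_one 0 16]
    have h16 : ((((n : Int) + 1) * 16) - (n : Int) * 16).toNat = 16 := by omega
    have h16' : ((16 : Int) - 0).toNat = 16 := by omega
    rw [h16, h16', List.map_map, List.map_map]
    apply List.map_congr_left
    intro k hk
    rw [List.mem_range] at hk
    have hkmod : ((n : Int) * 16 + (k : Int)) % 16 = (k : Int) := by omega
    simp [hkmod]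

theorem tile_eq (w c : Int) :
    (PySem.List.pyRange 0 (w * 16) 1).map
        (fun i => decide (c ≤ i % 16) && decide (i % 16 ≤ c + 2))
      = (List.replicate w.toNat
          ((PySem.List.pyRange 0 16 1).map
            (fun j => decide (c ≤ j) && decide (j ≤ c + 2)))).flatten := by
  by_cases hw : w ≤ 0
  · have h1 : w * 16 ≤ 0 := by omega
    have h2 : w.toNat = 0 := by omega
    rw [PySem.List.pyRange_one_eq_nil h1, h2]
    simp
  · have hw' : w = ((w.toNat : Nat) : Int) := by omega
    rw [hw']
    exact tile_eq_nat c w.toNat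

-- The assembled grid equality, phrased on the normalised goal shape.
theorem main_step (height width : Int) :
    List.foldl
      (fun g r =>
        List.foldl
          (fun g x_offset =>
            List.foldl
              (fun g dc =>
                if 0 ≤ (x_offset + if r % 16 < 8 then r % 16 else 15 - r % 16) + dc ∧
                      (x_offset + if r % 16 < 8 then r % 16 else 15 - r % 16) + dc < width * 16 then
                  g.modify r.toNat fun row =>
                    row.set ((x_offset + if r % 16 < 8 then r % 16 else 15 - r % 16) + dc).toNat true
                else g)
              g (PySem.List.pyRange 0 3 1))
          g (PySem.List.pyRange 0 (width * 16) 16))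
      (List.replicate (height * 8).toNat (List.replicate (width * 16).toNat false))
      (PySem.List.pyRange 0 (height * 8) 1) =
    List.map
      (fun x2 =>
        (List.replicate width.toNat
            (List.map
              (fun j =>
                decide ((if x2 % 16 < 8 then x2 % 16 else 15 - x2 % 16) ≤ j) &&
                  decide (j ≤ (if x2 % 16 < 8 then x2 % 16 else 15 - x2 % 16) + 2))
              (PySem.List.pyRange 0 16 1))).flatten)
      (PySem.List.pyRange 0 (height * 8) 1) := by
  have hstep : (fun (g : List (List Bool)) (r : Int) =>
        List.foldl
          (fun g x_offset =>
            List.foldl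
              (fun g dc =>
                if 0 ≤ (x_offset + if r % 16 < 8 then r % 16 else 15 - r % 16) + dc ∧
                      (x_offset + if r % 16 < 8 then r % 16 else 15 - r % 16) + dc < width * 16 then
                  g.modify r.toNat fun row =>
                    row.set ((x_offset + if r % 16 < 8 then r % 16 else 15 - r % 16) + dc).toNat true
                else g)
              g (PySem.List.pyRange 0 3 1))
          g (PySem.List.pyRange 0 (width * 16) 16))
      = fun (g : List (List Bool)) (r : Int) =>
          g.modify r.toNat (fun row =>
            List.foldl
              (fun row x_offset =>
                List.foldl
                  (fun row dc =>
                    if 0 ≤ (x_offset + if r % 16 < 8 then r % 16 else 15 - r % 16) + dc ∧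
                          (x_offset + if r % 16 < 8 then r % 16 else 15 - r % 16) + dc < width * 16 then
                      row.set ((x_offset + if r % 16 < 8 then r % 16 else 15 - r % 16) + dc).toNat true
                    else row)
                  row (PySem.List.pyRange 0 3 1))
              row (PySem.List.pyRange 0 (width * 16) 16)) := by
    funext g r
    have h1 : ∀ (x_offset : Int) (g : List (List Bool)),
        List.foldl
          (fun g dc =>
            if 0 ≤ (x_offset + if r % 16 < 8 then r % 16 else 15 - r % 16) + dc ∧
                  (x_offset + if r % 16 < 8 then r % 16 else 15 - r % 16) + dc < width * 16 then
              g.modify r.toNat fun row =>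
                row.set ((x_offset + if r % 16 < 8 then r % 16 else 15 - r % 16) + dc).toNat true
            else g)
          g (PySem.List.pyRange 0 3 1)
        = g.modify r.toNat (fun row =>
            List.foldl
              (fun row dc =>
                if 0 ≤ (x_offset + if r % 16 < 8 then r % 16 else 15 - r % 16) + dc ∧
                      (x_offset + if r % 16 < 8 then r % 16 else 15 - r % 16) + dc < width * 16 then
                  row.set ((x_offset + if r % 16 < 8 then r % 16 else 15 - r % 16) + dc).toNat true
                else row)
              row (PySem.List.pyRange 0 3 1)) := by
      intro x_offset g
      exact foldl_modify_if (PySem.List.pyRange 0 3 1) r.toNat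
        (fun dc row => row.set ((x_offset + if r % 16 < 8 then r % 16 else 15 - r % 16) + dc).toNat true)
        (fun dc => 0 ≤ (x_offset + if r % 16 < 8 then r % 16 else 15 - r % 16) + dc ∧
            (x_offset + if r % 16 < 8 then r % 16 else 15 - r % 16) + dc < width * 16) g
    calc List.foldl
          (fun g x_offset =>
            List.foldl
              (fun g dc =>
                if 0 ≤ (x_offset + if r % 16 < 8 then r % 16 else 15 - r % 16) + dc ∧
                      (x_offset + if r % 16 < 8 then r % 16 else 15 - r % 16) + dc < width * 16 then
                  g.modify r.toNat fun row =>
                    row.set ((x_offset + if r % 16 < 8 then r % 16 else 15 - r % 16) + dc).toNat true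
                else g)
              g (PySem.List.pyRange 0 3 1))
          g (PySem.List.pyRange 0 (width * 16) 16)
        = List.foldl
            (fun g x_offset =>
              g.modify r.toNat (fun row =>
                List.foldl
                  (fun row dc =>
                    if 0 ≤ (x_offset + if r % 16 < 8 then r % 16 else 15 - r % 16) + dc ∧
                          (x_offset + if r % 16 < 8 then r % 16 else 15 - r % 16) + dc < width * 16 then
                      row.set ((x_offset + if r % 16 < 8 then r % 16 else 15 - r % 16) + dc).toNat true
                    else row)
                  row (PySem.List.pyRange 0 3 1)))
            g (PySem.List.pyRange 0 (width * 16) 16) := by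
          have hfun := funext (fun (g : List (List Bool)) => funext (fun (x_offset : Int) => h1 x_offset g))
          rw [hfun]
      _ = _ := foldl_modify (PySem.List.pyRange 0 (width * 16) 16) r.toNat
            (fun x_offset row =>
              List.foldl
                (fun row dc =>
                  if 0 ≤ (x_offset + if r % 16 < 8 then r % 16 else 15 - r % 16) + dc ∧
                        (x_offset + if r % 16 < 8 then r % 16 else 15 - r % 16) + dc < width * 16 then
                    row.set ((x_offset + if r % 16 < 8 then r % 16 else 15 - r % 16) + dc).toNat true
                  else row)
                row (PySem.List.pyRange 0 3 1)) g
  rw [hstep]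
  have hcast : PySem.List.pyRange 0 (height * 8) 1
      = PySem.List.pyRange 0 (((height * 8).toNat : Nat) : Int) 1 := by
    rw [PySem.List.pyRange_one, PySem.List.pyRange_one]
    congr 2
    omega
  rw [hcast]
  obtain ⟨hlen, hget⟩ := foldl_range_modify
    (fun r row =>
      List.foldl
        (fun row x_offset =>
          List.foldl
            (fun row dc =>
              if 0 ≤ (x_offset + if r % 16 < 8 then r % 16 else 15 - r % 16) + dc ∧
                    (x_offset + if r % 16 < 8 then r % 16 else 15 - r % 16) + dc < width * 16 then
                row.set ((x_offset + if r % 16 < 8 then r % 16 else 15 - r % 16) + dc).toNat true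
              else row)
            row (PySem.List.pyRange 0 3 1))
        row (PySem.List.pyRange 0 (width * 16) 16))
    (height * 8).toNat
    (List.replicate (height * 8).toNat (List.replicate (width * 16).toNat false))
  apply List.ext_getElem
  · rw [hlen]
    simp [PySem.List.length_pyRange_one]
    omega
  · intro i h1' h2'
    have hi : i < (height * 8).toNat := by
      rw [hlen] at h1'; simpa using h1'
    rw [hget i (by simpa using hi) h1']
    simp only [hi, if_true]
    rw [List.getElem_replicate, List.getElem_map, PySem.List.getElem_pyRange_one]
    have hc0 : (0 : Int) ≤ (if (0 + (i : Int)) % 16 < 8 then (0 + (i : Int)) % 16 else 15 - (0 + (i : Int)) % 16) := by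
      split_ifs <;> omega
    have hc7 : (if (0 + (i : Int)) % 16 < 8 then (0 + (i : Int)) % 16 else 15 - (0 + (i : Int)) % 16) ≤ 7 := by
      split_ifs <;> omega
    have hrow := row_eq width _ hc0 hc7
    simp only [zero_add] at hrow ⊢
    exact hrow.trans (tile_eq width _)

-- ===== VERDICT (by name: the statement is the Claim_ definition above) =====
theorem make_zigzag_grid_py_spec : Claim_equal_make_zigzag_grid_py := by
  intro height width _
  unfold Spec_make_zigzag_grid_py make_zigzag_grid_py make_zigzag_grid_py_alt empty_py
  simp only []
  norm_num
  rw [flatten_map_singleton]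
  rw [main_step height width]
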